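-- pv_equiv track=rewrite | github.com/Logicish/p-lanes | src/core/transport.py | _pop_sentence
-- ===== SOURCE A (Python) =====
-- _ABBREVS = frozenset({
--     "dr", "mr", "mrs", "ms", "st", "vs", "etc", "jr", "sr",
--     "prof", "gen", "lt", "sgt", "cpl", "eg", "ie",
-- })
--
-- def _pop_sentence(buf: str) -> tuple[str | None, str]:
--     """Extract the first complete sentence from buf.
--     Splits on . ! ? followed by whitespace or end-of-string.
--     Skips abbreviations (Dr., Mr., etc.) and single-letter initials.
--     Returns (sentence, remainder) or (None, buf) if no complete
--     sentence is found yet."""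
--     for i, ch in enumerate(buf):
--         if ch not in ".!?":
--             continue
--         after = buf[i + 1] if i + 1 < len(buf) else " "
--         if after not in " \t\n":
--             continue
--         # for '.', skip abbreviations and single-letter initials
--         if ch == ".":
--             j = i - 1
--             while j >= 0 and buf[j].isalpha():
--                 j -= 1
--             word = buf[j + 1:i].lower()
--             if len(word) <= 1 or word in _ABBREVS:
--                 continue
--         return buf[:i + 1].strip(), buf[i + 1:].lstrip()
--     return None, buf
-- ===== SOURCE B (Python) =====
-- _ABBREVS = frozenset({
--     "dr", "mr", "mrs", "ms", "st", "vs", "etc", "jr", "sr",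
--     "prof", "gen", "lt", "sgt", "cpl", "eg", "ie",
-- })
--
-- def _pop_sentence(buf: str) -> tuple[str | None, str]:
--     """Single forward pass: track the start of the current alphabetic run
--     (word_start) and whether the previous char was alphabetic (prev_alpha),
--     so no backward scan is needed at each candidate break."""
--     n = len(buf)
--     word_start = 0
--     prev_alpha = False
--     for i, ch in enumerate(buf):
--         alpha = ch.isalpha()
--         if alpha and not prev_alpha:
--             word_start = i
--         if ch in ".!?" and (i + 1 == n or buf[i + 1] in " \t\n"):
--             ok = ch != "." or (prev_alpha and i - word_start > 1
--                                and buf[word_start:i].lower() not in _ABBREVS)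
--             if ok:
--                 return buf[:i + 1].strip(), buf[i + 1:].lstrip()
--         prev_alpha = alpha
--     return None, buf
-- ===== Notes on version B (the rewrite author's own statement) =====
-- stated objective: alternative
-- what changed: B makes a single forward pass that maintains the start of the current alphabetic run (word_start) and a prev_alpha flag, replacing A's backward while-loop scan over the word at every candidate sentence break.
import Mathlib
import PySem

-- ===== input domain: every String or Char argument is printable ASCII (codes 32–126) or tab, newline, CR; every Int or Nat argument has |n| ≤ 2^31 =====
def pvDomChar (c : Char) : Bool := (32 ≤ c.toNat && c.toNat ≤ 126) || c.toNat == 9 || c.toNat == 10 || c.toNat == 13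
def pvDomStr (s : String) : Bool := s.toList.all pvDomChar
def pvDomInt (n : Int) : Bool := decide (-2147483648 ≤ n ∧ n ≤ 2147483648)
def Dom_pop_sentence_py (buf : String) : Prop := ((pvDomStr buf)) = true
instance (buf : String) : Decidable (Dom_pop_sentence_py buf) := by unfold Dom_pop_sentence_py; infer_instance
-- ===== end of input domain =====

-- B replaces A's per-candidate backward while-loop by a single forward pass that
-- maintains the start of the current alphabetic run (objective: alternative decomposition).

-- the _ABBREVS constant, shared by both Pythons
def pvAbbrevs : List (List Char) :=
  ["dr", "mr", "mrs", "ms", "st", "vs", "etc", "jr", "sr",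
   "prof", "gen", "lt", "sgt", "cpl", "eg", "ie"].map String.toList

-- ===== PORT A =====
-- the 'j = i - 1; while j >= 0 and buf[j].isalpha(): j -= 1' loop of A,
-- phrased on k = j + 1 (so the result is directly the slice start j + 1);
-- every index read is in range, so List.getD is exact
def pvWhileJ (cs : List Char) : Nat → Nat
  | 0 => 0
  | k + 1 => if PySem.Chars.isalpha (cs.getD k ' ') then pvWhileJ cs k else k + 1

-- the 'for i, ch in enumerate(buf)' loop of A; rest = cs.drop i;
-- Python's 'buf[i + 1] if i + 1 < len(buf) else " "' is the guarded getD
def pvLoopA (cs : List Char) (i : Nat) : List Char → Option (List Char) × List Char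
  | [] => (none, cs)
  | ch :: rest =>
    if ch = '.' ∨ ch = '!' ∨ ch = '?' then
      if (if i + 1 < cs.length then cs.getD (i + 1) ' ' else ' ') = ' ' ∨
         (if i + 1 < cs.length then cs.getD (i + 1) ' ' else ' ') = '\t' ∨
         (if i + 1 < cs.length then cs.getD (i + 1) ' ' else ' ') = '\n' then
        if (if ch = '.' then
              decide ((PySem.Chars.lower (PySem.List.slice cs (some ((pvWhileJ cs i : Nat) : Int)) (some (i : Int)))).length ≤ 1) ||
              pvAbbrevs.contains (PySem.Chars.lower (PySem.List.slice cs (some ((pvWhileJ cs i : Nat) : Int)) (some (i : Int))))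
            else false) then
          pvLoopA cs (i + 1) rest
        else (some (PySem.Chars.strip (PySem.List.slice cs none (some ((i : Int) + 1)))),
              PySem.Chars.lstrip (PySem.List.slice cs (some ((i : Int) + 1)) none))
      else pvLoopA cs (i + 1) rest
    else pvLoopA cs (i + 1) rest

def pop_sentence_py (buf : String) : Option String × String :=
  ((pvLoopA buf.toList 0 buf.toList).1.map String.ofList,
   String.ofList (pvLoopA buf.toList 0 buf.toList).2)

-- ===== PORT B =====
-- single forward pass; ws = word_start, pa = prev_alpha; rest = cs.drop i
def pvLoopB (cs : List Char) (i ws : Nat) (pa : Bool) : List Char → Option (List Char) × List Char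
  | [] => (none, cs)
  | ch :: rest =>
    if (ch = '.' ∨ ch = '!' ∨ ch = '?') ∧
       (i + 1 = cs.length ∨ cs.getD (i + 1) ' ' = ' ' ∨ cs.getD (i + 1) ' ' = '\t' ∨ cs.getD (i + 1) ' ' = '\n') then
      if (ch != '.') ||
         (pa && decide (1 < i - (if PySem.Chars.isalpha ch && !pa then i else ws)) &&
          !(pvAbbrevs.contains (PySem.Chars.lower (PySem.List.slice cs
              (some ((if PySem.Chars.isalpha ch && !pa then i else ws : Nat) : Int)) (some (i : Int)))))) then
        (some (PySem.Chars.strip (PySem.List.slice cs none (some ((i : Int) + 1)))),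
         PySem.Chars.lstrip (PySem.List.slice cs (some ((i : Int) + 1)) none))
      else pvLoopB cs (i + 1) (if PySem.Chars.isalpha ch && !pa then i else ws) (PySem.Chars.isalpha ch) rest
    else pvLoopB cs (i + 1) (if PySem.Chars.isalpha ch && !pa then i else ws) (PySem.Chars.isalpha ch) rest

def pop_sentence_py_alt (buf : String) : Option String × String :=
  ((pvLoopB buf.toList 0 0 false buf.toList).1.map String.ofList,
   String.ofList (pvLoopB buf.toList 0 0 false buf.toList).2)

-- ===== PRECONDITION & SPEC =====
def Spec_pop_sentence_py (buf : String) (out : Option String × String) : Prop := out = pop_sentence_py_alt buf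
instance (buf : String) (out : Option String × String) : Decidable (Spec_pop_sentence_py buf out) := by unfold Spec_pop_sentence_py; infer_instance

-- ===== CLAIM (what is proved, stated in full; the proofs are below) =====
def Claim_equal_pop_sentence_py : Prop := ∀ (buf : String), Dom_pop_sentence_py buf → Spec_pop_sentence_py buf (pop_sentence_py buf)

-- ===== LEMMAS AND PROOFS =====

lemma if_not_swap {α : Type} (b : Bool) (x y : α) :
    (if (!b) = true then x else y) = (if b = true then y else x) := by
  cases b <;> simp

-- if the char before position i is not alphabetic (or i = 0), the backward scan stops at i
lemma pvWhileJ_of_not_prev (cs : List Char) (i : Nat)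
    (h : (decide (0 < i) && PySem.Chars.isalpha (cs.getD (i - 1) ' ')) = false) :
    pvWhileJ cs i = i := by
  cases i with
  | zero => rfl
  | succ k =>
    have h' : PySem.Chars.isalpha (cs.getD k ' ') = false := by
      simpa using h
    simp only [pvWhileJ]
    rw [h']
    simp

-- main loop equivalence, carrying B's running invariants:
-- pa says whether cs[i-1] is alphabetic, and when it is, ws is the start of the
-- alphabetic run ending at i-1 (= what A's backward scan from i computes)
lemma loop_eq (cs : List Char) (rest : List Char) : ∀ (i ws : Nat) (pa : Bool),
    rest = cs.drop i →
    pa = (decide (0 < i) && PySem.Chars.isalpha (cs.getD (i - 1) ' ')) →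
    (pa = true → pvWhileJ cs i = ws ∧ ws < i) →
    pvLoopA cs i rest = pvLoopB cs i ws pa rest := by
  induction rest with
  | nil => intro i ws pa _ _ _; rfl
  | cons ch rest ih =>
    intro i ws pa hdrop hpa hws
    -- facts about position i
    have hget : cs[i]? = some ch := by
      have h1 : (cs.drop i)[0]? = some ch := by rw [← hdrop]; rfl
      rw [List.getElem?_drop] at h1; simpa using h1
    have hrest : cs.drop (i + 1) = rest := by
      have h2 : cs.drop (i + 1) = (cs.drop i).drop 1 := by rw [List.drop_drop]
      rw [h2, ← hdrop]; rfl
    have hlen : i < cs.length := (List.getElem?_eq_some_iff.mp hget).1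
    have hch : cs.getD i ' ' = ch := by
      rw [List.getD_eq_getElem?_getD, hget]; rfl
    -- recursive call: invariants at i + 1
    have hrec : pvLoopA cs (i + 1) rest =
        pvLoopB cs (i + 1) (if PySem.Chars.isalpha ch && !pa then i else ws) (PySem.Chars.isalpha ch) rest := by
      apply ih
      · exact hrest.symm
      · rw [show i + 1 - 1 = i from rfl, hch]; simp
      · intro ha
        have hstep : pvWhileJ cs (i + 1) = pvWhileJ cs i := by
          simp only [pvWhileJ]; rw [hch, ha]; simp
        cases hpa' : pa with
        | true =>
          obtain ⟨h1, h2⟩ := hws hpa'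
          refine ⟨by simp [ha, hstep, h1], by simp [ha]; omega⟩
        | false =>
          have hJ := pvWhileJ_of_not_prev cs i (by rw [← hpa, hpa'])
          refine ⟨by simp [ha, hstep, hJ], by simp [ha]⟩
    -- A's after-condition coincides with B's (the out-of-range default is ' ' either way)
    have hafter : ((if i + 1 < cs.length then cs.getD (i + 1) ' ' else ' ') = ' ' ∨
                   (if i + 1 < cs.length then cs.getD (i + 1) ' ' else ' ') = '\t' ∨
                   (if i + 1 < cs.length then cs.getD (i + 1) ' ' else ' ') = '\n')
        ↔ (i + 1 = cs.length ∨ cs.getD (i + 1) ' ' = ' ' ∨ cs.getD (i + 1) ' ' = '\t' ∨ cs.getD (i + 1) ' ' = '\n') := by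
      by_cases h : i + 1 < cs.length
      · rw [if_pos h]
        have hne : ¬(i + 1 = cs.length) := by omega
        tauto
      · rw [if_neg h]
        have he : cs.getD (i + 1) ' ' = ' ' := List.getD_eq_default _ _ (by omega)
        constructor
        · intro _; exact Or.inr (Or.inl he)
        · intro _; exact Or.inl rfl
    simp only [pvLoopA, pvLoopB]
    by_cases hc : ch = '.' ∨ ch = '!' ∨ ch = '?'
    · by_cases hb : (i + 1 = cs.length ∨ cs.getD (i + 1) ' ' = ' ' ∨ cs.getD (i + 1) ' ' = '\t' ∨ cs.getD (i + 1) ' ' = '\n')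
      · have hBcond : (ch = '.' ∨ ch = '!' ∨ ch = '?') ∧
            (i + 1 = cs.length ∨ cs.getD (i + 1) ' ' = ' ' ∨ cs.getD (i + 1) ' ' = '\t' ∨ cs.getD (i + 1) ' ' = '\n') := ⟨hc, hb⟩
        rw [if_pos hc, if_pos (hafter.mpr hb), if_pos hBcond]
        -- A's skip flag is the negation of B's ok flag
        have hok : (if ch = '.' then
              decide ((PySem.Chars.lower (PySem.List.slice cs (some ((pvWhileJ cs i : Nat) : Int)) (some (i : Int)))).length ≤ 1) ||
              pvAbbrevs.contains (PySem.Chars.lower (PySem.List.slice cs (some ((pvWhileJ cs i : Nat) : Int)) (some (i : Int))))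
            else false) =
            !((ch != '.') ||
              (pa && decide (1 < i - (if PySem.Chars.isalpha ch && !pa then i else ws)) &&
               !(pvAbbrevs.contains (PySem.Chars.lower (PySem.List.slice cs
                   (some ((if PySem.Chars.isalpha ch && !pa then i else ws : Nat) : Int)) (some (i : Int))))))) := by
          by_cases hdot : ch = '.'
          · subst hdot
            have hna : PySem.Chars.isalpha '.' = false := by decide
            rw [if_pos rfl, hna, show (('.' : Char) != '.') = false from rfl, Bool.false_and, Bool.false_or]
            cases hpa' : pa with
            | false =>
              have hJ := pvWhileJ_of_not_prev cs i (by rw [← hpa, hpa'])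
              have hword : PySem.List.slice cs (some ((i : Nat) : Int)) (some ((i : Nat) : Int)) = ([] : List Char) := by
                rw [PySem.List.slice_natCast]; simp
              rw [hJ, hword]
              simp [PySem.Chars.lower, pvAbbrevs]
            | true =>
              obtain ⟨hJ, hlt⟩ := hws hpa'
              rw [hJ, Bool.true_and]
              have hwlen : (PySem.Chars.lower (PySem.List.slice cs (some ((ws : Nat) : Int)) (some ((i : Nat) : Int)))).length = i - ws := by
                rw [PySem.List.slice_natCast]
                simp [PySem.Chars.lower]
                omega
              rw [hwlen]
              by_cases hc2 : PySem.Chars.lower (PySem.List.slice cs (some ((ws : Nat) : Int)) (some ((i : Nat) : Int))) ∈ pvAbbrevs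
              · simp [hc2]
              · by_cases hl : 1 < i - ws
                · simp [hc2, hl, show ¬(i - ws ≤ 1) from by omega]
                · simp [hc2, hl, show i - ws ≤ 1 from by omega]
          · have hbne : (ch != '.') = true := by simp [hdot]
            rw [if_neg hdot, hbne, Bool.true_or]
            rfl
        rw [hok, hrec, if_not_swap]
      · have hA : ¬ ((if i + 1 < cs.length then cs.getD (i + 1) ' ' else ' ') = ' ' ∨
                   (if i + 1 < cs.length then cs.getD (i + 1) ' ' else ' ') = '\t' ∨
                   (if i + 1 < cs.length then cs.getD (i + 1) ' ' else ' ') = '\n') := fun h => hb (hafter.mp h)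
        rw [if_pos hc, if_neg hA, if_neg (fun hh => hb hh.2)]
        exact hrec
    · rw [if_neg hc, if_neg (fun hh => hc hh.1)]
      exact hrec

-- ===== VERDICT (by name: the statement is the Claim_ definition above) =====
theorem pop_sentence_py_spec : Claim_equal_pop_sentence_py := by
  intro buf _
  unfold Spec_pop_sentence_py pop_sentence_py pop_sentence_py_alt
  rw [loop_eq buf.toList buf.toList 0 0 false rfl (by simp) (by simp)]
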